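-- pv_equiv track=rewrite | github.com/WallerTsai/OJ-Solution | leetcode-py/数论/质因数分解/No2521.py | distinctPrimeFactors
-- ===== SOURCE A (Python) =====
-- from typing import List
--
-- def distinctPrimeFactors(nums: List[int]) -> int:
--     s = set()
--     for x in nums:
--         i = 2
--         while i ** 2 <= x:  # 枚举
--             if x % i == 0:
--                 s.add(i)
--                 x //= i
--                 while x % i == 0:   # 还是含有 i 因子
--                     x //= i
--             i += 1
--         if x > 1:   # 余下的质因子
--             s.add(x)
--     return len(s)
-- ===== SOURCE B (Python) =====
-- from typing import List
--
-- def distinctPrimeFactors(nums: List[int]) -> int: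
--     # Stage 1: bound L = isqrt(max value), computed without math.
--     mx = 1
--     for x in nums:
--         if x > mx:
--             mx = x
--     L = 1
--     while (L + 1) * (L + 1) <= mx:
--         L += 1
--     # Stage 2: sieve the composites up to L, then list the primes once.
--     comp = [False] * (L + 1)
--     for d in range(2, L + 1):
--         for q in range(2, L // d + 1):
--             comp[d * q] = True
--     primes = [p for p in range(2, L + 1) if not comp[p]]
--     # Stage 3: factor every number over the precomputed prime list only.
--     s = set()
--     for x in nums:
--         for p in primes:
--             if p * p > x:
--                 break
--             if x % p == 0:
--                 s.add(p)
--                 while x % p == 0: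
--                     x //= p
--         if x > 1:
--             s.add(x)
--     return len(s)
-- ===== Notes on version B (the rewrite author's own statement) =====
-- stated objective: alternative
-- what changed: B precomputes the primes up to isqrt(max(nums)) once with a multiples-marking sieve and factors every number over that precomputed prime list only, instead of A's per-number trial division over every candidate i with i**2 <= x.
import Mathlib
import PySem

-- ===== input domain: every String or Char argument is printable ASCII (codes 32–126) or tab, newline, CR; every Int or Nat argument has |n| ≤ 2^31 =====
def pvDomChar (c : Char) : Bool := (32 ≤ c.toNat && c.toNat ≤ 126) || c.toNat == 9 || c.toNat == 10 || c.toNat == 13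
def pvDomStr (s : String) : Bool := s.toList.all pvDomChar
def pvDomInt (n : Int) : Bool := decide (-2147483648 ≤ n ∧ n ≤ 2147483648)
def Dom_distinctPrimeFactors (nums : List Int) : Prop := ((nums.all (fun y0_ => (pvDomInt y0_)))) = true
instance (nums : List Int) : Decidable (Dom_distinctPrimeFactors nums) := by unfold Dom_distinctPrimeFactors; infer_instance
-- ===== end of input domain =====

-- B precomputes the primes up to isqrt(max(nums)) once (multiples-marking sieve) and factors every
-- number over that prime list only, instead of A's per-number trial division over every candidate;
-- return values proved equal, no argument is mutated.
-- (While-loops are ported with a Nat fuel that provably exceeds the iteration count — a totality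
-- device only; the guards `2 ≤ i` / `1 ≤ x` always hold when the Python reaches the loop.)

-- ===== PORT A =====
-- A's inner `while x % i == 0: x //= i`
def aStripGo : Nat → Int → Int → Int
  | 0, x, _ => x
  | fuel + 1, x, i =>
    if 2 ≤ i ∧ 1 ≤ x ∧ PySem.Int.mod x i = 0 then aStripGo fuel (PySem.Int.floordiv x i) i else x

def aStrip (x i : Int) : Int := aStripGo x.toNat x i

-- A's `while i ** 2 <= x` loop over one element x, threading the shared set s; the final
-- `if x > 1: s.add(x)` of A's body is the else-branch
def aLoopGo : Nat → Int → Int → PySem.Set Int → PySem.Set Int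
  | 0, _, _, s => s
  | fuel + 1, x, i, s =>
    if 2 ≤ i ∧ i ^ 2 ≤ x then
      if PySem.Int.mod x i = 0 then
        aLoopGo fuel (aStrip (PySem.Int.floordiv x i) i) (i + 1) (PySem.Set.add s i)
      else aLoopGo fuel x (i + 1) s
    else if 1 < x then PySem.Set.add s x else s

def distinctPrimeFactors (nums : List Int) : Int :=
  PySem.Set.len (nums.foldl (fun s x => aLoopGo (x.toNat + 1) x 2 s) PySem.Set.empty)

-- ===== PORT B =====
-- B stage 1: `mx = 1; for x in nums: if x > mx: mx = x`
def bMax (nums : List Int) : Int := nums.foldl (fun m x => if x > m then x else m) 1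

-- B stage 1: `L = 1; while (L+1)*(L+1) <= mx: L += 1`
def bSqrtGo : Nat → Int → Int → Int
  | 0, L, _ => L
  | fuel + 1, L, mx => if (L + 1) * (L + 1) ≤ mx then bSqrtGo fuel (L + 1) mx else L

def bSqrt (mx : Int) : Int := bSqrtGo mx.toNat 1 mx

-- B stage 2, inner loop: `for q in range(2, L // d + 1): comp[d * q] = True`
-- (the Python list is an Array; the index d*q is provably in `0 ≤ d*q ≤ L`, in bounds, so
--  `setIfInBounds`/`.toNat` are exact)
def bMarkRow (L : Int) (c : Array Bool) (d : Int) : Array Bool :=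
  (PySem.List.pyRange 2 (PySem.Int.floordiv L d + 1) 1).foldl
    (fun c2 q => c2.setIfInBounds (d * q).toNat true) c

-- B stage 2: `comp = [False]*(L+1); for d in range(2, L+1): <mark the multiples of d>`
def bSieve (L : Int) : Array Bool :=
  (PySem.List.pyRange 2 (L + 1) 1).foldl (bMarkRow L) (Array.replicate (L + 1).toNat false)

-- B stage 2: `primes = [p for p in range(2, L+1) if not comp[p]]` (the read `comp[p]` has 0 ≤ p ≤ L, exact)
def bPrimes (L : Int) : List Int :=
  let comp := bSieve L
  (PySem.List.pyRange 2 (L + 1) 1).filter (fun p => !(comp.getD p.toNat false))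

-- B stage 3, inner `while x % p == 0: x //= p`
def bStripGo : Nat → Int → Int → Int
  | 0, x, _ => x
  | fuel + 1, x, d =>
    if 1 ≤ x ∧ 2 ≤ d ∧ PySem.Int.mod x d = 0 then bStripGo fuel (PySem.Int.floordiv x d) d else x

def bStrip (x d : Int) : Int := bStripGo x.toNat x d

-- B stage 3: `for p in primes: if p*p > x: break; if x % p == 0: s.add(p); <strip>` then
-- `if x > 1: s.add(x)` (reached both on break and on exhaustion)
def bFactorGo : List Int → Int → PySem.Set Int → PySem.Set Int
  | [], x, s => if 1 < x then PySem.Set.add s x else s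
  | p :: ps, x, s =>
    if p * p > x then (if 1 < x then PySem.Set.add s x else s)
    else if PySem.Int.mod x p = 0 then bFactorGo ps (bStrip x p) (PySem.Set.add s p)
    else bFactorGo ps x s

def distinctPrimeFactors_alt (nums : List Int) : Int :=
  let primes := bPrimes (bSqrt (bMax nums))
  PySem.Set.len (nums.foldl (fun s x => bFactorGo primes x s) PySem.Set.empty)

-- ===== PRECONDITION & SPEC =====
def Spec_distinctPrimeFactors (nums : List Int) (out : Int) : Prop := out = distinctPrimeFactors_alt nums
instance (nums : List Int) (out : Int) : Decidable (Spec_distinctPrimeFactors nums out) := by unfold Spec_distinctPrimeFactors; infer_instance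

-- ===== CLAIM (what is proved, stated in full; the proofs are below) =====
def Claim_equal_distinctPrimeFactors : Prop := ∀ (nums : List Int), Dom_distinctPrimeFactors nums → Spec_distinctPrimeFactors nums (distinctPrimeFactors nums)

-- ===== LEMMAS AND PROOFS =====

theorem pvMulSelfLt {x i : Int} (hx : 1 ≤ x) (hi : 2 ≤ i) : x < x * i :=
  calc x = x * 1 := (mul_one x).symm
    _ < x * i := mul_lt_mul_of_pos_left (by omega) (by omega)

theorem pvSelfLeMul {i : Int} (hi : 2 ≤ i) : i ≤ i * i :=
  calc i = i * 1 := (mul_one i).symm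
    _ ≤ i * i := mul_le_mul_of_nonneg_left (by omega) (by omega)

theorem pvFloordivLt {x i : Int} (hx : 1 ≤ x) (hi : 2 ≤ i) :
    0 ≤ PySem.Int.floordiv x i ∧ PySem.Int.floordiv x i < x := by
  rw [PySem.Int.floordiv_eq_ediv_of_pos (by omega)]
  exact ⟨Int.ediv_nonneg (by omega) (by omega), Int.ediv_lt_of_lt_mul (by omega) (pvMulSelfLt hx hi)⟩

theorem pvFloordivPos {x i : Int} (hi : 2 ≤ i) (hle : i ≤ x) : 1 ≤ PySem.Int.floordiv x i := by
  rw [PySem.Int.floordiv_eq_ediv_of_pos (by omega), Int.le_ediv_iff_mul_le (by omega)]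
  omega

-- the two strip loops compute the same function (their guards are the same condition)
theorem bStripGo_eq_aStripGo : ∀ (n : Nat) (x d : Int), bStripGo n x d = aStripGo n x d := by
  intro n
  induction n with
  | zero => intro x d; rfl
  | succ n ih =>
    intro x d
    simp only [bStripGo, aStripGo]
    have hiff : (1 ≤ x ∧ 2 ≤ d ∧ PySem.Int.mod x d = 0) ↔ (2 ≤ d ∧ 1 ≤ x ∧ PySem.Int.mod x d = 0) := by
      tauto
    rw [if_congr hiff rfl rfl]
    split_ifs with h
    · exact ih _ _
    · rfl

theorem aStripGo_bounds : ∀ (n : Nat) (x i : Int), 1 ≤ x →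
    1 ≤ aStripGo n x i ∧ aStripGo n x i ≤ x := by
  intro n
  induction n with
  | zero => intro x i hx; exact ⟨hx, le_refl x⟩
  | succ n ih =>
    intro x i hx
    simp only [aStripGo]
    split_ifs with h
    · have hdvd : i ∣ x := (PySem.Int.mod_eq_zero_iff_dvd x i).mp h.2.2
      have hle : i ≤ x := Int.le_of_dvd (by omega) hdvd
      have h1 : 1 ≤ PySem.Int.floordiv x i := pvFloordivPos h.1 hle
      have h2 := pvFloordivLt h.2.1 h.1
      have := ih (PySem.Int.floordiv x i) i h1
      omega
    · exact ⟨hx, le_refl x⟩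

-- what the strip loop computes (with enough fuel): divides out every factor i
theorem aStripGo_spec : ∀ (n : Nat) (x i : Int), 2 ≤ i → 1 ≤ x → x.toNat ≤ n →
    ∃ k : ℕ, x = i ^ k * aStripGo n x i ∧ ¬ i ∣ aStripGo n x i ∧ 1 ≤ aStripGo n x i := by
  intro n
  induction n with
  | zero => intro x i hi hx hn; omega
  | succ n ih =>
    intro x i hi hx hn
    simp only [aStripGo]
    split_ifs with h
    · have hdvd : i ∣ x := (PySem.Int.mod_eq_zero_iff_dvd x i).mp h.2.2
      have hle : i ≤ x := Int.le_of_dvd (by omega) hdvd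
      have h1 : 1 ≤ PySem.Int.floordiv x i := pvFloordivPos h.1 hle
      have h2 := pvFloordivLt h.2.1 h.1
      obtain ⟨k, hk, hnd, hpos⟩ := ih (PySem.Int.floordiv x i) i hi h1 (by omega)
      refine ⟨k + 1, ?_, hnd, hpos⟩
      have hxeq : x = i * PySem.Int.floordiv x i := by
        rw [PySem.Int.floordiv_eq_ediv_of_pos (by omega)]
        exact (Int.mul_ediv_cancel' hdvd).symm
      calc x = i * PySem.Int.floordiv x i := hxeq
        _ = i * (i ^ k * aStripGo n (PySem.Int.floordiv x i) i) := by rw [← hk]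
        _ = i ^ (k + 1) * aStripGo n (PySem.Int.floordiv x i) i := by ring
    · refine ⟨0, by ring, ?_, hx⟩
      intro hdvd
      exact h ⟨hi, hx, (PySem.Int.mod_eq_zero_iff_dvd x i).mpr hdvd⟩

theorem aStrip_spec (x i : Int) (hi : 2 ≤ i) (hx : 1 ≤ x) :
    ∃ k : ℕ, x = i ^ k * aStrip x i ∧ ¬ i ∣ aStrip x i ∧ 1 ≤ aStrip x i :=
  aStripGo_spec x.toNat x i hi hx (le_refl _)

theorem bStrip_spec (x d : Int) (hd : 2 ≤ d) (hx : 1 ≤ x) :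
    ∃ k : ℕ, x = d ^ k * bStrip x d ∧ ¬ d ∣ bStrip x d ∧ 1 ≤ bStrip x d := by
  rw [bStrip, bStripGo_eq_aStripGo]
  exact aStripGo_spec x.toNat x d hd hx (le_refl _)

theorem bStrip_lt {x d : Int} (hd : 2 ≤ d) (hx : 1 ≤ x) (hm : PySem.Int.mod x d = 0) :
    1 ≤ bStrip x d ∧ bStrip x d < x := by
  have hdvd : d ∣ x := (PySem.Int.mod_eq_zero_iff_dvd x d).mp hm
  have hle : d ≤ x := Int.le_of_dvd (by omega) hdvd
  have h1 : 1 ≤ PySem.Int.floordiv x d := pvFloordivPos hd hle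
  have h2 := pvFloordivLt hx hd
  have hfuel : ∃ m : Nat, x.toNat = m + 1 := ⟨x.toNat - 1, by omega⟩
  obtain ⟨m, hmfuel⟩ := hfuel
  rw [bStrip, hmfuel]
  simp only [bStripGo]
  rw [if_pos ⟨hx, hd, hm⟩]
  rw [bStripGo_eq_aStripGo]
  have := aStripGo_bounds m (PySem.Int.floordiv x d) d h1
  omega

-- a positive integer i dividing x, with no divisor of x in [2, i), is prime
theorem int_prime_of_dvd_min {i x : Int} (hi : 2 ≤ i) (hdvd : i ∣ x) (hx : 1 ≤ x)
    (h : ∀ d : Int, 2 ≤ d → d < i → ¬ d ∣ x) : Prime i := by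
  rw [Int.prime_iff_natAbs_prime]
  rw [Nat.prime_def_lt]
  refine ⟨by omega, ?_⟩
  intro m hm hmd
  by_contra hm1
  have hm2 : 2 ≤ m := by
    rcases Nat.lt_or_ge m 2 with h2 | h2
    · interval_cases m
      · simp at hmd; omega
      · omega
    · exact h2
  have hdm : (m : Int) ∣ i := by
    have : (m : Int) ∣ (i.natAbs : Int) := Int.natCast_dvd_natCast.mpr hmd
    rwa [Int.natAbs_of_nonneg (by omega)] at this
  exact h m (by exact_mod_cast hm2) (by omega) (hdm.trans hdvd)

-- a number below i^2 with no divisor in [2, i) is prime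
theorem int_prime_of_no_small_divisors {x i : Int} (hx : 1 < x) (hxi : x < i ^ 2) (hi : 2 ≤ i)
    (h : ∀ d : Int, 2 ≤ d → d < i → ¬ d ∣ x) : Prime x := by
  rw [Int.prime_iff_natAbs_prime]
  by_contra hnp
  have hn2 : 2 ≤ x.natAbs := by omega
  have hsq := Nat.minFac_sq_le_self (by omega) hnp
  have hd := Nat.minFac_dvd x.natAbs
  have h2 : 2 ≤ x.natAbs.minFac := (Nat.minFac_prime (by omega : x.natAbs ≠ 1)).two_le
  have hdi : (x.natAbs.minFac : Int) ∣ x := by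
    have h3 : (x.natAbs.minFac : Int) ∣ (x.natAbs : Int) := Int.natCast_dvd_natCast.mpr hd
    rwa [Int.natAbs_of_nonneg (by omega)] at h3
  have hge : i ≤ (x.natAbs.minFac : Int) := by
    by_contra hlt
    exact h _ (by exact_mod_cast h2) (by omega) hdi
  have hsq' : ((x.natAbs.minFac : Int)) ^ 2 ≤ x := by
    calc ((x.natAbs.minFac : Int)) ^ 2 = ((x.natAbs.minFac ^ 2 : Nat) : Int) := by push_cast; ring
      _ ≤ ((x.natAbs : Nat) : Int) := by exact_mod_cast hsq
      _ = x := Int.natAbs_of_nonneg (by omega)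
  nlinarith

-- a positive integer all of whose prime divisors q have q*q > x is prime
theorem int_prime_of_sq_gt {x : Int} (hx : 1 < x)
    (h : ∀ q : Int, 2 ≤ q → Prime q → q ∣ x → x < q * q) : Prime x := by
  rw [Int.prime_iff_natAbs_prime]
  by_contra hnp
  have hn2 : 2 ≤ x.natAbs := by omega
  have hsq := Nat.minFac_sq_le_self (by omega) hnp
  have hmp := Nat.minFac_prime (by omega : x.natAbs ≠ 1)
  have hdi : (x.natAbs.minFac : Int) ∣ x := by
    have h3 : (x.natAbs.minFac : Int) ∣ (x.natAbs : Int) :=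
      Int.natCast_dvd_natCast.mpr (Nat.minFac_dvd x.natAbs)
    rwa [Int.natAbs_of_nonneg (by omega)] at h3
  have hqp : Prime ((x.natAbs.minFac : Nat) : Int) := by
    rw [Int.prime_iff_natAbs_prime]; simpa using hmp
  have hlt := h _ (by exact_mod_cast hmp.two_le) hqp hdi
  have hsq' : ((x.natAbs.minFac : Int)) * (x.natAbs.minFac : Int) ≤ x := by
    calc ((x.natAbs.minFac : Int)) * (x.natAbs.minFac : Int)
        = ((x.natAbs.minFac * x.natAbs.minFac : Nat) : Int) := by push_cast; ring
      _ ≤ ((x.natAbs : Nat) : Int) := by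
          have := hsq
          rw [pow_two] at this
          exact_mod_cast this
      _ = x := Int.natAbs_of_nonneg (by omega)
  omega

-- two positive primes related by divisibility are equal
theorem prime_eq_of_dvd {a x : Int} (ha2 : 2 ≤ a) (ha : Prime a) (hx2 : 1 < x) (hx : Prime x)
    (hdvd : a ∣ x) : a = x := by
  have h1 : a.natAbs ∣ x.natAbs := Int.natAbs_dvd_natAbs.mpr hdvd
  have h2 : a.natAbs = x.natAbs :=
    (Nat.prime_dvd_prime_iff_eq (Int.prime_iff_natAbs_prime.mp ha)
      (Int.prime_iff_natAbs_prime.mp hx)).mp h1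
  omega

-- pulling one prime power out of x does not change its set of prime divisors besides i
theorem factor_step {i x x' : Int} {k : ℕ} (hi2 : 2 ≤ i) (hip : Prime i)
    (hx : x = i ^ (k + 1) * x') (a : Int) :
    (2 ≤ a ∧ Prime a ∧ a ∣ x) ↔ (a = i ∨ (2 ≤ a ∧ Prime a ∧ a ∣ x')) := by
  constructor
  · rintro ⟨ha2, hap, had⟩
    rw [hx] at had
    rcases hap.2.2 _ _ had with h1 | h2
    · left
      have : a ∣ i := hap.dvd_of_dvd_pow h1
      exact prime_eq_of_dvd ha2 hap (by omega) hip this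
    · exact Or.inr ⟨ha2, hap, h2⟩
  · rintro (ha | ⟨ha2, hap, had⟩)
    · rw [ha]
      exact ⟨hi2, hip, hx ▸ Dvd.dvd.mul_right (dvd_pow_self i (Nat.succ_ne_zero k)) x'⟩
    · exact ⟨ha2, hap, hx ▸ had.mul_left _⟩

-- membership characterisation of A's trial-division loop (fuel beyond the measure x+2-i)
theorem aLoopGo_mem : ∀ (n : Nat) (x i : Int) (s : PySem.Set Int), 1 ≤ x → 2 ≤ i →
    x.toNat + 2 - i.toNat < n →
    (∀ d : Int, 2 ≤ d → d < i → ¬ d ∣ x) → ∀ a : Int,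
    (a ∈ aLoopGo n x i s ↔ a ∈ s ∨ (2 ≤ a ∧ Prime a ∧ a ∣ x)) := by
  intro n
  induction n with
  | zero => intro x i s hx hi hn; omega
  | succ n ih =>
    intro x i s hx hi hn hinv a
    simp only [aLoopGo]
    by_cases hg : 2 ≤ i ∧ i ^ 2 ≤ x
    · rw [if_pos hg]
      have hix : i ≤ x := le_trans (le_trans (pvSelfLeMul hg.1) (le_of_eq (sq i).symm)) hg.2
      by_cases hm : PySem.Int.mod x i = 0
      · rw [if_pos hm]
        have hdvd : i ∣ x := (PySem.Int.mod_eq_zero_iff_dvd x i).mp hm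
        have hip : Prime i := int_prime_of_dvd_min hg.1 hdvd hx hinv
        have h1 : 1 ≤ PySem.Int.floordiv x i := pvFloordivPos hg.1 hix
        have hfd := pvFloordivLt hx hg.1
        obtain ⟨k, hk, hnd, hpos⟩ := aStrip_spec (PySem.Int.floordiv x i) i hg.1 h1
        have hb := aStripGo_bounds (PySem.Int.floordiv x i).toNat (PySem.Int.floordiv x i) i h1
        rw [show aStripGo (PySem.Int.floordiv x i).toNat (PySem.Int.floordiv x i) i
              = aStrip (PySem.Int.floordiv x i) i from rfl] at hb
        have hxeq : x = i * PySem.Int.floordiv x i := by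
          rw [PySem.Int.floordiv_eq_ediv_of_pos (by omega)]
          exact (Int.mul_ediv_cancel' hdvd).symm
        have hxk : x = i ^ (k + 1) * aStrip (PySem.Int.floordiv x i) i := by
          generalize hX : aStrip (PySem.Int.floordiv x i) i = X at hk ⊢
          rw [hxeq, hk]
          ring
        have hx'dvd : aStrip (PySem.Int.floordiv x i) i ∣ x := by
          conv_rhs => rw [hxk]
          exact dvd_mul_left _ _
        have hinv' : ∀ d : Int, 2 ≤ d → d < i + 1 → ¬ d ∣ aStrip (PySem.Int.floordiv x i) i := by
          intro d h2 hlt hdvd'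
          by_cases hdi : d = i
          · exact hnd (hdi ▸ hdvd')
          · exact hinv d h2 (by omega) (hdvd'.trans hx'dvd)
        rw [ih _ (i + 1) (PySem.Set.add s i) hpos (by omega) (by omega) hinv' a,
          PySem.Set.mem_add, factor_step hg.1 hip hxk a]
        tauto
      · rw [if_neg hm]
        have hni : ¬ i ∣ x := fun hd => hm ((PySem.Int.mod_eq_zero_iff_dvd x i).mpr hd)
        have hinv' : ∀ d : Int, 2 ≤ d → d < i + 1 → ¬ d ∣ x := by
          intro d h2 hlt
          by_cases hdi : d = i
          · exact hdi ▸ hni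
          · exact hinv d h2 (by omega)
        rw [ih x (i + 1) s hx (by omega) (by omega) hinv' a]
    · rw [if_neg hg]
      by_cases hx1 : 1 < x
      · rw [if_pos hx1, PySem.Set.mem_add]
        have hxi : x < i ^ 2 := lt_of_not_ge (fun hh => hg ⟨hi, hh⟩)
        have hxp : Prime x := int_prime_of_no_small_divisors hx1 hxi hi hinv
        constructor
        · rintro (h' | h')
          · exact Or.inl h'
          · refine Or.inr ?_
            rw [h']
            exact ⟨by omega, hxp, dvd_refl x⟩
        · rintro (h' | ⟨ha2, hap, had⟩)
          · exact Or.inl h'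
          · exact Or.inr (prime_eq_of_dvd ha2 hap hx1 hxp had)
      · rw [if_neg hx1]
        constructor
        · exact Or.inl
        · rintro (h' | ⟨ha2, hap, had⟩)
          · exact h'
          · exfalso
            rw [show x = 1 by omega] at had
            have := Int.le_of_dvd one_pos had
            omega

-- A's whole body for one element x (loop entered at i = 2, fuel x.toNat + 1)
theorem aOne_mem (x : Int) (s : PySem.Set Int) (a : Int) :
    a ∈ aLoopGo (x.toNat + 1) x 2 s ↔ a ∈ s ∨ (1 < x ∧ 2 ≤ a ∧ Prime a ∧ a ∣ x) := by
  by_cases hx : 1 < x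
  · rw [aLoopGo_mem (x.toNat + 1) x 2 s (by omega) le_rfl (by omega) (fun d h2 hlt => by omega) a]
    tauto
  · simp only [aLoopGo]
    rw [if_neg (fun hh : (2:Int) ≤ 2 ∧ (2:Int) ^ 2 ≤ x => by
        have := hh.2
        norm_num at this
        omega), if_neg hx]
    have : ¬ (1 < x) := hx
    tauto

-- ----- B stage 1: max and integer square root -----

theorem bMax_spec (nums : List Int) : 1 ≤ bMax nums ∧ ∀ x ∈ nums, x ≤ bMax nums := by
  have main : ∀ (l : List Int) (m : Int),
      m ≤ l.foldl (fun m x => if x > m then x else m) m ∧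
      ∀ x ∈ l, x ≤ l.foldl (fun m x => if x > m then x else m) m := by
    intro l
    induction l with
    | nil => intro m; simp
    | cons y l ih =>
      intro m
      simp only [List.foldl_cons, List.mem_cons]
      have step : m ≤ (if y > m then y else m) ∧ y ≤ (if y > m then y else m) := by
        split_ifs <;> omega
      have := ih (if y > m then y else m)
      constructor
      · omega
      · rintro x (rfl | hx)
        · omega
        · exact (this.2 x hx)
  exact ⟨(main nums 1).1, (main nums 1).2⟩

theorem bSqrtGo_spec : ∀ (f : Nat) (L mx : Int), 1 ≤ L → mx.toNat ≤ f + L.toNat →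
    1 ≤ bSqrtGo f L mx ∧ mx < (bSqrtGo f L mx + 1) * (bSqrtGo f L mx + 1) := by
  intro f
  induction f with
  | zero =>
    intro L mx hL hf
    simp only [bSqrtGo]
    have hml : mx ≤ L := by omega
    exact ⟨hL, by nlinarith [mul_self_nonneg L]⟩
  | succ f ih =>
    intro L mx hL hf
    simp only [bSqrtGo]
    split_ifs with h
    · exact ih (L + 1) mx (by omega) (by omega)
    · omega

theorem bSqrt_spec (mx : Int) (h1 : 1 ≤ mx) :
    1 ≤ bSqrt mx ∧ mx < (bSqrt mx + 1) * (bSqrt mx + 1) :=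
  bSqrtGo_spec mx.toNat 1 mx le_rfl (by omega)

-- ----- B stage 2: the sieve -----

-- Array.getD through getElem?
theorem arrGetD (a : Array Bool) (i : Nat) : a.getD i false = a[i]?.getD false := by
  unfold Array.getD
  split <;> simp_all

-- generic: a fold of in-bounds writes of `true` sets `true` exactly at the listed indices
theorem foldl_set_getD (g : Int → Nat) : ∀ (ms : List Int) (c : Array Bool) (k : Nat),
    (∀ m ∈ ms, g m < c.size) →
    (((ms.foldl (fun c2 m => c2.setIfInBounds (g m) true) c).getD k false = true) ↔
      (c.getD k false = true ∨ ∃ m ∈ ms, g m = k)) := by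
  intro ms
  induction ms with
  | nil => intro c k h; simp
  | cons m ms ih =>
    intro c k h
    simp only [List.foldl_cons, List.mem_cons]
    have hlen : (c.setIfInBounds (g m) true).size = c.size := by simp
    rw [ih (c.setIfInBounds (g m) true) k
      (by intro m' hm'; rw [hlen]; exact h m' (List.mem_cons_of_mem m hm'))]
    have hset : (c.setIfInBounds (g m) true).getD k false = true ↔
        (c.getD k false = true ∨ g m = k) := by
      rw [arrGetD, arrGetD, Array.getElem?_setIfInBounds]
      by_cases hk : g m = k
      · subst hk
        simp [h m List.mem_cons_self]
      · simp [hk]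
    rw [hset]
    constructor
    · rintro ((h1 | h1) | ⟨m', hm', hg⟩)
      · exact Or.inl h1
      · exact Or.inr ⟨m, Or.inl rfl, h1⟩
      · exact Or.inr ⟨m', Or.inr hm', hg⟩
    · rintro (h1 | ⟨m', (rfl | hm'), hg⟩)
      · exact Or.inl (Or.inl h1)
      · exact Or.inl (Or.inr hg)
      · exact Or.inr ⟨m', hm', hg⟩

theorem foldl_set_length (g : Int → Nat) : ∀ (ms : List Int) (c : Array Bool),
    (ms.foldl (fun c2 m => c2.setIfInBounds (g m) true) c).size = c.size := by
  intro ms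
  induction ms with
  | nil => intro c; rfl
  | cons m ms ih => intro c; simp [List.foldl_cons, ih]

theorem bMarkRow_length (L : Int) (c : Array Bool) (d : Int) :
    (bMarkRow L c d).size = c.size :=
  foldl_set_length (fun q => (d * q).toNat) _ c

theorem bMarkRow_getD (L : Int) (c : Array Bool) (d : Int) (hc : c.size = (L + 1).toNat)
    (hd : 2 ≤ d) (hL : 0 ≤ L) (k : Nat) :
    ((bMarkRow L c d).getD k false = true ↔
      c.getD k false = true ∨ ∃ q : Int, 2 ≤ q ∧ d * q ≤ L ∧ (d * q).toNat = k) := by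
  have hmem : ∀ q : Int, q ∈ PySem.List.pyRange 2 (PySem.Int.floordiv L d + 1) 1 ↔
      (2 ≤ q ∧ d * q ≤ L) := by
    intro q
    rw [PySem.List.mem_pyRange_one]
    constructor
    · rintro ⟨h2, hlt⟩
      refine ⟨h2, ?_⟩
      have : q ≤ PySem.Int.floordiv L d := by omega
      rw [PySem.Int.le_floordiv_iff_mul_le (by omega)] at this
      have hcm : q * d = d * q := mul_comm q d
      omega
    · rintro ⟨h2, hle⟩
      refine ⟨h2, ?_⟩
      have : q ≤ PySem.Int.floordiv L d := by
        rw [PySem.Int.le_floordiv_iff_mul_le (by omega)]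
        have hcm : q * d = d * q := mul_comm q d
        omega
      omega
  unfold bMarkRow
  rw [foldl_set_getD]
  · constructor
    · rintro (h1 | ⟨q, hq, hg⟩)
      · exact Or.inl h1
      · exact Or.inr ⟨q, ((hmem q).mp hq).1, ((hmem q).mp hq).2, hg⟩
    · rintro (h1 | ⟨q, h2, hle, hg⟩)
      · exact Or.inl h1
      · exact Or.inr ⟨q, (hmem q).mpr ⟨h2, hle⟩, hg⟩
  · intro q hq
    obtain ⟨h2, hle⟩ := (hmem q).mp hq
    have hpos : 0 ≤ d * q := by positivity
    omega

theorem bSieveFold (L : Int) (hL : 0 ≤ L) : ∀ (ds : List Int) (c : Array Bool),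
    c.size = (L + 1).toNat → (∀ d ∈ ds, 2 ≤ d) → ∀ k : Nat,
    ((ds.foldl (bMarkRow L) c).getD k false = true ↔
      c.getD k false = true ∨ ∃ d ∈ ds, ∃ q : Int, 2 ≤ q ∧ d * q ≤ L ∧ (d * q).toNat = k) := by
  intro ds
  induction ds with
  | nil => intro c hc hds k; simp
  | cons d ds ih =>
    intro c hc hds k
    simp only [List.foldl_cons, List.mem_cons]
    rw [ih (bMarkRow L c d) (by rw [bMarkRow_length, hc]) (fun d' hd' => hds d' (List.mem_cons_of_mem d hd')) k,
      bMarkRow_getD L c d hc (hds d List.mem_cons_self) hL k]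
    constructor
    · rintro ((h1 | ⟨q, hq⟩) | ⟨d', hd', hq⟩)
      · exact Or.inl h1
      · exact Or.inr ⟨d, Or.inl rfl, q, hq⟩
      · exact Or.inr ⟨d', Or.inr hd', hq⟩
    · rintro (h1 | ⟨d', (rfl | hd'), hq⟩)
      · exact Or.inl (Or.inl h1)
      · exact Or.inl (Or.inr hq)
      · exact Or.inr ⟨d', hd', hq⟩

theorem bSieve_getD (L : Int) (hL : 0 ≤ L) (k : Nat) :
    ((bSieve L).getD k false = true ↔
      ∃ d q : Int, 2 ≤ d ∧ 2 ≤ q ∧ d * q ≤ L ∧ (d * q).toNat = k) := by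
  unfold bSieve
  rw [bSieveFold L hL _ _ (by simp) (fun d hd => (PySem.List.mem_pyRange_one.mp hd).1) k]
  simp only [arrGetD, Array.getElem?_replicate]
  constructor
  · rintro (h1 | ⟨d, hd, q, h2, hle, hg⟩)
    · split_ifs at h1 <;> simp at h1
    · exact ⟨d, q, (PySem.List.mem_pyRange_one.mp hd).1, h2, hle, hg⟩
  · rintro ⟨d, q, hd2, hq2, hle, hg⟩
    refine Or.inr ⟨d, PySem.List.mem_pyRange_one.mpr ⟨hd2, ?_⟩, q, hq2, hle, hg⟩
    have : 2 * d ≤ q * d := mul_le_mul_of_nonneg_right hq2 (by omega)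
    nlinarith

-- ¬ Prime ↔ a proper factorisation, on [2, ∞)
theorem exists_factor_of_not_prime {p : Int} (h2 : 2 ≤ p) (hnp : ¬ Prime p) :
    ∃ d q : Int, 2 ≤ d ∧ 2 ≤ q ∧ d * q = p := by
  have hnp' : ¬ p.natAbs.Prime := fun h => hnp (Int.prime_iff_natAbs_prime.mpr h)
  have hn2 : 2 ≤ p.natAbs := by omega
  have hmp := Nat.minFac_prime (show p.natAbs ≠ 1 by omega)
  have hdvd := Nat.minFac_dvd p.natAbs
  obtain ⟨q, hq⟩ := hdvd
  have hq2 : 2 ≤ q := by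
    rcases Nat.lt_or_ge q 2 with h | h
    · interval_cases q
      · omega
      · rw [Nat.mul_one] at hq
        exact absurd (hq ▸ hmp) hnp'
    · exact h
  refine ⟨(p.natAbs.minFac : Int), (q : Int), by exact_mod_cast hmp.two_le, by exact_mod_cast hq2, ?_⟩
  have : ((p.natAbs.minFac * q : Nat) : Int) = (p.natAbs : Int) := by exact_mod_cast hq.symm
  push_cast at this
  omega

theorem not_prime_of_factor {d q p : Int} (hd : 2 ≤ d) (hq : 2 ≤ q) (h : d * q = p) :
    ¬ Prime p := by
  intro hp
  have hdp : d ∣ p := ⟨q, h.symm⟩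
  have hdlt : d < p := by nlinarith
  have hqlt : q < p := by nlinarith
  rcases hp.2.2 d q (h ▸ dvd_refl p) with h1 | h1
  · have := Int.le_of_dvd (by omega) h1
    omega
  · have := Int.le_of_dvd (by omega) h1
    omega

theorem mem_bPrimes (L p : Int) (hL : 0 ≤ L) :
    p ∈ bPrimes L ↔ 2 ≤ p ∧ p ≤ L ∧ Prime p := by
  unfold bPrimes
  simp only []
  rw [List.mem_filter, PySem.List.mem_pyRange_one]
  constructor
  · rintro ⟨⟨h2, hlt⟩, hf⟩
    refine ⟨h2, by omega, ?_⟩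
    by_contra hnp
    obtain ⟨d, q, hd, hq, hdq⟩ := exists_factor_of_not_prime h2 hnp
    have : (bSieve L).getD p.toNat false = true :=
      (bSieve_getD L hL p.toNat).mpr ⟨d, q, hd, hq, by omega, by rw [hdq]⟩
    rw [this] at hf
    simp at hf
  · rintro ⟨h2, hle, hp⟩
    refine ⟨⟨h2, by omega⟩, ?_⟩
    by_cases hs : (bSieve L).getD p.toNat false = true
    · obtain ⟨d, q, hd, hq, hle', hg⟩ := (bSieve_getD L hL p.toNat).mp hs
      have hdq : d * q = p := by
        have h0 : 0 ≤ d * q := by positivity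
        omega
      exact absurd hp (not_prime_of_factor hd hq hdq)
    · simpa using hs

theorem bPrimes_sorted (L : Int) : (bPrimes L).Pairwise (· < ·) :=
  (PySem.List.pairwise_lt_pyRange_one 2 (L + 1)).filter _

-- ----- B stage 3: factorisation over the prime list -----

-- terminal case: if every prime divisor q of x has x < q*q, the leftover is prime (or 1)
theorem bTerminal_mem (x : Int) (s : PySem.Set Int) (a : Int) (hx : 1 ≤ x)
    (hbig : ∀ q : Int, 2 ≤ q → Prime q → q ∣ x → x < q * q) :
    (a ∈ (if 1 < x then PySem.Set.add s x else s) ↔ a ∈ s ∨ (2 ≤ a ∧ Prime a ∧ a ∣ x)) := by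
  split_ifs with h1
  · rw [PySem.Set.mem_add]
    have hxp : Prime x := int_prime_of_sq_gt h1 hbig
    constructor
    · rintro (h' | h')
      · exact Or.inl h'
      · refine Or.inr ?_
        rw [h']
        exact ⟨by omega, hxp, dvd_refl x⟩
    · rintro (h' | ⟨ha2, hap, had⟩)
      · exact Or.inl h'
      · exact Or.inr (prime_eq_of_dvd ha2 hap h1 hxp had)
  · constructor
    · exact Or.inl
    · rintro (h' | ⟨ha2, hap, had⟩)
      · exact h'
      · exfalso
        rw [show x = 1 by omega] at had
        have := Int.le_of_dvd one_pos had
        omega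

theorem bFactorGo_mem : ∀ (ps : List Int) (x : Int) (s : PySem.Set Int), 1 ≤ x →
    (∀ p ∈ ps, 2 ≤ p ∧ Prime p) → ps.Pairwise (· < ·) →
    (∀ q : Int, 2 ≤ q → Prime q → q ∣ x → q ∈ ps ∨ x < q * q) → ∀ a : Int,
    (a ∈ bFactorGo ps x s ↔ a ∈ s ∨ (2 ≤ a ∧ Prime a ∧ a ∣ x)) := by
  intro ps
  induction ps with
  | nil =>
    intro x s hx hall hsort hinv a
    simp only [bFactorGo]
    exact bTerminal_mem x s a hx (fun q h2 hp hd => (hinv q h2 hp hd).resolve_left (by simp))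
  | cons p ps ih =>
    intro x s hx hall hsort hinv a
    obtain ⟨hp2, hpp⟩ := hall p (List.mem_cons_self)
    rw [List.pairwise_cons] at hsort
    simp only [bFactorGo]
    by_cases hbreak : p * p > x
    · rw [if_pos hbreak]
      refine bTerminal_mem x s a hx ?_
      intro q h2 hp hd
      rcases hinv q h2 hp hd with hmem | hlt
      · rcases List.mem_cons.mp hmem with rfl | hmem'
        · omega
        · have hpq : p < q := hsort.1 q hmem'
          nlinarith
      · exact hlt
    · rw [if_neg hbreak]
      by_cases hm : PySem.Int.mod x p = 0
      · rw [if_pos hm]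
        have hdvd : p ∣ x := (PySem.Int.mod_eq_zero_iff_dvd x p).mp hm
        obtain ⟨k, hk, hnd, hpos⟩ := bStrip_spec x p hp2 hx
        have hlt := bStrip_lt hp2 hx hm
        match k, hk with
        | 0, hk =>
          exfalso
          rw [pow_zero, one_mul] at hk
          exact hnd (hk ▸ hdvd)
        | k' + 1, hk =>
          have hx'dvd : bStrip x p ∣ x := by
            conv_rhs => rw [hk]
            exact dvd_mul_left _ _
          have hinv' : ∀ q : Int, 2 ≤ q → Prime q → q ∣ bStrip x p → q ∈ ps ∨ bStrip x p < q * q := by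
            intro q h2 hqp hqd
            by_cases hqep : q = p
            · exact absurd (hqep ▸ hqd) hnd
            · rcases hinv q h2 hqp (hqd.trans hx'dvd) with hmem | hlt'
              · exact Or.inl ((List.mem_cons.mp hmem).resolve_left hqep)
              · exact Or.inr (by omega)
          rw [ih (bStrip x p) (PySem.Set.add s p) hpos
              (fun p' hp' => hall p' (List.mem_cons_of_mem p hp')) hsort.2 hinv' a,
            PySem.Set.mem_add, factor_step hp2 hpp hk a]
          tauto
      · rw [if_neg hm]
        have hnd : ¬ p ∣ x := fun hdd => hm ((PySem.Int.mod_eq_zero_iff_dvd x p).mpr hdd)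
        have hinv' : ∀ q : Int, 2 ≤ q → Prime q → q ∣ x → q ∈ ps ∨ x < q * q := by
          intro q h2 hqp hqd
          by_cases hqep : q = p
          · exact absurd (hqep ▸ hqd) hnd
          · rcases hinv q h2 hqp hqd with hmem | hlt'
            · exact Or.inl ((List.mem_cons.mp hmem).resolve_left hqep)
            · exact Or.inr hlt'
        exact ih x s hx (fun p' hp' => hall p' (List.mem_cons_of_mem p hp')) hsort.2 hinv' a

-- B's whole stage-3 body for one element x ≤ mx, primes taken up to L = bSqrt mx
theorem bOne_mem (mx : Int) (hmx : 1 ≤ mx) (x : Int) (hx : x ≤ mx) (s : PySem.Set Int) (a : Int) :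
    a ∈ bFactorGo (bPrimes (bSqrt mx)) x s ↔ a ∈ s ∨ (1 < x ∧ 2 ≤ a ∧ Prime a ∧ a ∣ x) := by
  obtain ⟨hL1, hLsq⟩ := bSqrt_spec mx hmx
  set L := bSqrt mx with hLdef
  by_cases hx1 : 1 < x
  · have hinv : ∀ q : Int, 2 ≤ q → Prime q → q ∣ x → q ∈ bPrimes L ∨ x < q * q := by
      intro q h2 hqp hqd
      by_cases hqL : q ≤ L
      · exact Or.inl ((mem_bPrimes L q (by omega)).mpr ⟨h2, hqL, hqp⟩)
      · refine Or.inr ?_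
        have : L + 1 ≤ q := by omega
        nlinarith
    rw [bFactorGo_mem (bPrimes L) x s (by omega)
        (fun p hp => ⟨((mem_bPrimes L p (by omega)).mp hp).1, ((mem_bPrimes L p (by omega)).mp hp).2.2⟩)
        (bPrimes_sorted L) hinv a]
    tauto
  · have hres : bFactorGo (bPrimes L) x s = s := by
      cases hP : bPrimes L with
      | nil => simp [bFactorGo, hx1]
      | cons p ps =>
        have hp2 : 2 ≤ p := ((mem_bPrimes L p (by omega)).mp (hP ▸ List.mem_cons_self)).1
        have : p * p > x := by nlinarith
        simp [bFactorGo, this, hx1]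
    rw [hres]
    have : ¬ (1 < x) := hx1
    tauto

-- folding any body with that characterisation collects the prime factors of all elements
theorem foldl_mem_aux (g : PySem.Set Int → Int → PySem.Set Int) :
    ∀ (l : List Int),
    (∀ (s : PySem.Set Int) (x a : Int), x ∈ l → (a ∈ g s x ↔ a ∈ s ∨ (1 < x ∧ 2 ≤ a ∧ Prime a ∧ a ∣ x))) →
    ∀ (s : PySem.Set Int) (a : Int),
    (a ∈ l.foldl g s ↔ a ∈ s ∨ ∃ x ∈ l, 1 < x ∧ 2 ≤ a ∧ Prime a ∧ a ∣ x) := by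
  intro l
  induction l with
  | nil => intro hg s a; simp
  | cons y l ih =>
    intro hg s a
    simp only [List.foldl_cons]
    rw [ih (fun s x a hx => hg s x a (List.mem_cons_of_mem y hx)) (g s y) a,
      hg s y a List.mem_cons_self]
    simp only [List.mem_cons]
    constructor
    · rintro ((h | h) | ⟨x, hx, hh⟩)
      · exact Or.inl h
      · exact Or.inr ⟨y, Or.inl rfl, h⟩
      · exact Or.inr ⟨x, Or.inr hx, hh⟩
    · rintro (h | ⟨x, (rfl | hx), hh⟩)
      · exact Or.inl (Or.inl h)
      · exact Or.inl (Or.inr hh)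
      · exact Or.inr ⟨x, hx, hh⟩

theorem aLoopGo_nodup : ∀ (n : Nat) (x i : Int) (s : PySem.Set Int), s.Nodup → (aLoopGo n x i s).Nodup := by
  intro n
  induction n with
  | zero => intro x i s hs; exact hs
  | succ n ih =>
    intro x i s hs
    simp only [aLoopGo]
    split_ifs
    · exact ih _ _ _ (PySem.Set.nodup_add _ _ hs)
    · exact ih _ _ _ hs
    · exact PySem.Set.nodup_add _ _ hs
    · exact hs

theorem bFactorGo_nodup : ∀ (ps : List Int) (x : Int) (s : PySem.Set Int), s.Nodup → (bFactorGo ps x s).Nodup := by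
  intro ps
  induction ps with
  | nil =>
    intro x s hs
    simp only [bFactorGo]
    split_ifs
    · exact PySem.Set.nodup_add _ _ hs
    · exact hs
  | cons p ps ih =>
    intro x s hs
    simp only [bFactorGo]
    split_ifs
    · exact PySem.Set.nodup_add _ _ hs
    · exact hs
    · exact ih _ _ (PySem.Set.nodup_add _ _ hs)
    · exact ih _ _ hs

theorem foldl_nodup (g : PySem.Set Int → Int → PySem.Set Int)
    (hg : ∀ (s : PySem.Set Int) (x : Int), s.Nodup → (g s x).Nodup) :
    ∀ (l : List Int) (s : PySem.Set Int), s.Nodup → (l.foldl g s).Nodup := by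
  intro l
  induction l with
  | nil => intro s h; exact h
  | cons y l ih => intro s h; exact ih _ (hg s y h)

-- ===== VERDICT (by name: the statement is the Claim_ definition above) =====
theorem distinctPrimeFactors_spec : Claim_equal_distinctPrimeFactors := by
  intro nums _
  unfold Spec_distinctPrimeFactors distinctPrimeFactors distinctPrimeFactors_alt
  obtain ⟨hmx1, hmxall⟩ := bMax_spec nums
  have hA := foldl_mem_aux (fun s x => aLoopGo (x.toNat + 1) x 2 s) nums
    (fun s x a _ => aOne_mem x s a) PySem.Set.empty
  have hB := foldl_mem_aux (fun s x => bFactorGo (bPrimes (bSqrt (bMax nums))) x s) nums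
    (fun s x a hx => bOne_mem (bMax nums) hmx1 x (hmxall x hx) s a) PySem.Set.empty
  have hndA := foldl_nodup (fun s x => aLoopGo (x.toNat + 1) x 2 s)
    (fun s x h => aLoopGo_nodup (x.toNat + 1) x 2 s h) nums PySem.Set.empty List.nodup_nil
  have hndB := foldl_nodup (fun s x => bFactorGo (bPrimes (bSqrt (bMax nums))) x s)
    (fun s x h => bFactorGo_nodup _ x s h) nums PySem.Set.empty List.nodup_nil
  have hperm : (nums.foldl (fun s x => aLoopGo (x.toNat + 1) x 2 s) PySem.Set.empty).Perm
      (nums.foldl (fun s x => bFactorGo (bPrimes (bSqrt (bMax nums))) x s) PySem.Set.empty) := by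
    rw [List.perm_ext_iff_of_nodup hndA hndB]
    intro a
    rw [hA a, hB a]
  simp only [PySem.Set.len, hperm.length_eq]
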